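-- pv_equiv track=rewrite | github.com/matthewglasenapp/hla_resolve | hla_resolve/hla_typer_beta.py | allele_matches_truth
-- ===== SOURCE A (Python) =====
-- def allele_matches_truth(candidate, truth_alleles):
--     """
--     Check if candidate allele matches any of the truth alleles.
--     Handles partial matches (e.g., truth 'HLA-A*02' matches 'HLA-A*02:01:01:01')
--     """
--     for truth in truth_alleles:
--         # Exact match
--         if candidate == truth:
--             return True
--
--         # Truth is partial (fewer fields) - check if candidate starts with it
--         # e.g., truth = "HLA-A*02:01:01" should match "HLA-A*02:01:01:01"
--         truth_fields = truth.split(':')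
--         cand_fields = candidate.split(':')
--
--         if len(truth_fields) <= len(cand_fields):
--             # Compare up to the number of fields in truth
--             truth_prefix = ':'.join(truth_fields)
--             cand_prefix = ':'.join(cand_fields[:len(truth_fields)])
--             if truth_prefix == cand_prefix:
--                 return True
--
--     return False
-- ===== SOURCE B (Python) =====
-- def allele_matches_truth(candidate, truth_alleles):
--     """
--     Check if candidate allele matches any of the truth alleles.
--     Precompute the set of all field-aligned prefixes of the candidate
--     (the candidate itself plus every cut at a ':'), then one set
--     intersection test against the truth alleles replaces all per-truth
--     string comparisons.
--     """
--     prefixes = {candidate}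
--     for i, ch in enumerate(candidate):
--         if ch == ':':
--             prefixes.add(candidate[:i])
--     return not prefixes.isdisjoint(truth_alleles)
-- ===== Notes on version B (the rewrite author's own statement) =====
-- stated objective: faster
-- what changed: Instead of testing each truth allele against the candidate (A splits, slices and re-joins the candidate's fields afresh for every truth), B precomputes once the set of all field-aligned prefixes of the candidate and answers with a single set-disjointness test against the truth list, so all per-truth splitting/joining disappears.
import Mathlib
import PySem

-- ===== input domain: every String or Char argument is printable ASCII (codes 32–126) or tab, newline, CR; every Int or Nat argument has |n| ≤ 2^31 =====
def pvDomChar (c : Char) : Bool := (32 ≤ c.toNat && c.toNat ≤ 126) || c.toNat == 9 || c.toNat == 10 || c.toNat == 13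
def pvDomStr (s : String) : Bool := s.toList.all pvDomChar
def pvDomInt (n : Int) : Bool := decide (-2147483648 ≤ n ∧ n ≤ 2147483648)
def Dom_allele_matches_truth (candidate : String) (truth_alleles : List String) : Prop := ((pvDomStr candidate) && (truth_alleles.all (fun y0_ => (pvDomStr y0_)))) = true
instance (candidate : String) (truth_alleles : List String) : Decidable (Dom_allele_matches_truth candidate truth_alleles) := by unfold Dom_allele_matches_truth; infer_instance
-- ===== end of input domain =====

-- B replaces A's per-truth split/slice/join comparison by a different strategy: build once the
-- set of all field-aligned prefixes of the candidate, then one set-disjointness test against the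
-- truth list (alternative decomposition; no per-truth string work).

-- ===== PORT A =====
-- exact port of Python's s.split(':'): PySem.Chars.splitOn with the nonempty separator [':']
def pySplitColon (s : String) : List String :=
  (PySem.Chars.splitOn s.toList [':']).map String.ofList

def allele_matches_truth_go (candidate : String) : List String → Bool
  | [] => false
  | truth :: rest =>
    if candidate == truth then true
    else
      let truth_fields := pySplitColon truth
      let cand_fields := pySplitColon candidate
      if truth_fields.length ≤ cand_fields.length then
        let truth_prefix := PySem.Str.join ":" truth_fields
        let cand_prefix := PySem.Str.join ":" (PySem.List.slice cand_fields none (some ((truth_fields.length : Int))))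
        if truth_prefix == cand_prefix then true
        else allele_matches_truth_go candidate rest
      else allele_matches_truth_go candidate rest

def allele_matches_truth (candidate : String) (truth_alleles : List String) : Bool :=
  allele_matches_truth_go candidate truth_alleles

-- ===== PORT B =====
-- prefixes = {candidate}; for i, ch in enumerate(candidate): if ch == ':': prefixes.add(candidate[:i])
-- return not prefixes.isdisjoint(truth_alleles)
def allele_matches_truth_alt (candidate : String) (truth_alleles : List String) : Bool :=
  let prefixes : PySem.Set String :=
    (PySem.List.enumerate candidate.toList).foldl
      (fun s p =>
        if p.2 = ':' then
          PySem.Set.add s (String.ofList (PySem.List.slice candidate.toList none (some p.1)))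
        else s)
      (PySem.Set.ofList [candidate])
  !(PySem.Set.isdisjoint prefixes truth_alleles)

-- ===== PRECONDITION & SPEC =====
def Spec_allele_matches_truth (candidate : String) (truth_alleles : List String) (out : Bool) : Prop := out = allele_matches_truth_alt candidate truth_alleles
instance (candidate : String) (truth_alleles : List String) (out : Bool) : Decidable (Spec_allele_matches_truth candidate truth_alleles out) := by unfold Spec_allele_matches_truth; infer_instance

-- ===== CLAIM (what is proved, stated in full; the proofs are below) =====
def Claim_equal_allele_matches_truth : Prop := ∀ (candidate : String) (truth_alleles : List String), Dom_allele_matches_truth candidate truth_alleles → Spec_allele_matches_truth candidate truth_alleles (allele_matches_truth candidate truth_alleles)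

-- ===== LEMMAS AND PROOFS =====

-- A simple structural single-character split, used only in the proofs.
def split1 : List Char → List (List Char)
  | [] => [[]]
  | c :: r =>
    if c = ':' then [] :: split1 r
    else
      match split1 r with
      | [] => [[c]]
      | p :: ps => (c :: p) :: ps

theorem split1_ne_nil (l : List Char) : split1 l ≠ [] := by
  cases l with
  | nil => simp [split1]
  | cons c r =>
    simp only [split1]
    split_ifs
    · simp
    · cases h : split1 r <;> simp

theorem split1_head (l : List Char) : ∃ p ps, split1 l = p :: ps := by
  cases h : split1 l with
  | nil => exact absurd h (split1_ne_nil l)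
  | cons a b => exact ⟨a, b, rfl⟩

theorem split1_colon (r : List Char) : split1 (':' :: r) = [] :: split1 r := by
  simp [split1]

theorem split1_cons_ne (c : Char) (r q : List Char) (qs : List (List Char))
    (hc : c ≠ ':') (hq : split1 r = q :: qs) : split1 (c :: r) = (c :: q) :: qs := by
  simp [split1, hc, hq]

theorem go_succ_colon (f : Nat) (r cur : List Char) (acc : List (List Char)) :
    PySem.Chars.splitOn.go [':'] (f + 1) (':' :: r) cur acc =
      PySem.Chars.splitOn.go [':'] f r [] (cur.reverse :: acc) := by
  simp [PySem.Chars.splitOn.go, List.isPrefixOf]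

theorem go_succ_ne (f : Nat) (c : Char) (r cur : List Char) (acc : List (List Char))
    (hc : c ≠ ':') :
    PySem.Chars.splitOn.go [':'] (f + 1) (c :: r) cur acc =
      PySem.Chars.splitOn.go [':'] f r (c :: cur) acc := by
  simp only [PySem.Chars.splitOn.go]
  simp [List.isPrefixOf]
  intro h
  exact absurd h.symm hc

theorem splitOn_go_colon (l : List Char) : ∀ (fuel : Nat) (cur : List Char)
    (acc : List (List Char)) (p : List Char) (ps : List (List Char)),
    l.length < fuel → split1 l = p :: ps →
    PySem.Chars.splitOn.go [':'] fuel l cur acc =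
      acc.reverse ++ (cur.reverse ++ p) :: ps := by
  induction l with
  | nil =>
    intro fuel cur acc p ps hf hs
    cases fuel with
    | zero => omega
    | succ f =>
      obtain ⟨rfl, rfl⟩ := by simpa [split1] using hs
      simp [PySem.Chars.splitOn.go]
  | cons c r ih =>
    intro fuel cur acc p ps hf hs
    cases fuel with
    | zero => simp at hf
    | succ f =>
      obtain ⟨q, qs, hq⟩ := split1_head r
      by_cases hc : c = ':'
      · subst hc
        rw [split1_colon, hq] at hs
        obtain ⟨rfl, rfl⟩ := by simpa using hs
        rw [go_succ_colon, ih f [] (cur.reverse :: acc) q qs (by simpa using hf) hq]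
        simp
      · rw [split1_cons_ne c r q qs hc hq] at hs
        obtain ⟨rfl, rfl⟩ := by simpa using hs
        rw [go_succ_ne f c r cur acc hc, ih f (c :: cur) acc q qs (by simpa using hf) hq]
        simp

theorem splitOn_colon (s : List Char) : PySem.Chars.splitOn s [':'] = split1 s := by
  obtain ⟨p, ps, hp⟩ := split1_head s
  rw [PySem.Chars.splitOn, splitOn_go_colon s (s.length + 1) [] [] p ps (by omega) hp, hp]
  simp

-- intercalate over a cons with a head extended on the left
theorem intercalate_cons_head (a : Char) (q : List Char) (r : List (List Char)) :
    List.intercalate [':'] ((a :: q) :: r) = a :: List.intercalate [':'] (q :: r) := by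
  cases r <;> simp [List.intercalate]

theorem intercalate_nil_cons (r : List (List Char)) (hr : r ≠ []) :
    List.intercalate [':'] ([] :: r) = ':' :: List.intercalate [':'] r := by
  cases r with
  | nil => exact absurd rfl hr
  | cons x xs => simp [List.intercalate]

theorem join_split1 (t : List Char) : List.intercalate [':'] (split1 t) = t := by
  induction t with
  | nil => simp [split1, List.intercalate]
  | cons c r ih =>
    by_cases hc : c = ':'
    · subst hc
      rw [split1_colon, intercalate_nil_cons _ (split1_ne_nil r), ih]
    · obtain ⟨q, qs, hq⟩ := split1_head r
      rw [hq] at ih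
      rw [split1_cons_ne c r q qs hc hq, intercalate_cons_head, ih]

-- The heart of the A-side: A's field-prefix test is exact-match-or-(truth ++ ":")-prefix.
theorem main_iff (c : List Char) : ∀ (t : List Char),
    ((split1 t).length ≤ (split1 c).length ∧
      List.intercalate [':'] (List.take (split1 t).length (split1 c)) = t)
    ↔ (c = t ∨ t ++ [':'] <+: c) := by
  induction c with
  | nil =>
    intro t
    cases t with
    | nil => simp [split1, List.intercalate]
    | cons a t' =>
      constructor
      · rintro ⟨-, h2⟩
        exfalso
        rw [show split1 ([] : List Char) = [[]] from rfl] at h2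
        cases hL : (split1 (a :: t')).length with
        | zero => rw [hL] at h2; simp [List.intercalate] at h2
        | succ n => rw [hL] at h2; simp [List.take_succ_cons, List.intercalate] at h2
      · rintro (h | h)
        · simp at h
        · exfalso
          have := h.length_le
          simp at this
  | cons d c' ih =>
    intro t
    cases t with
    | nil =>
      rw [show split1 ([] : List Char) = [[]] from rfl]
      by_cases hd : d = ':'
      · subst hd
        rw [split1_colon]
        constructor
        · intro _; right; exact ⟨c', by simp⟩
        · intro _
          refine ⟨by simp, ?_⟩
          simp [List.take_succ_cons, List.intercalate]
      · obtain ⟨q, qs, hq⟩ := split1_head c'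
        rw [split1_cons_ne d c' q qs hd hq]
        constructor
        · rintro ⟨-, h2⟩
          exfalso
          simp [List.take_succ_cons, intercalate_cons_head] at h2
        · rintro (h | h)
          · simp at h
          · exfalso
            rcases h with ⟨u, hu⟩
            have : ':' = d := by simpa using congrArg (fun l => l.head?) hu
            exact hd this.symm
    | cons a t' =>
      obtain ⟨p, ps, hp⟩ := split1_head t'
      obtain ⟨q, qs, hq⟩ := split1_head c'
      have key := ih t'
      rw [hp, hq] at key
      by_cases ha : a = ':' <;> by_cases hd : d = ':'
      · -- both heads ':'
        subst ha; subst hd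
        rw [split1_colon, split1_colon, hp, hq]
        constructor
        · rintro ⟨h1, h2⟩
          simp only [List.length_cons, List.take_succ_cons] at h1 h2
          rw [intercalate_nil_cons _ (List.cons_ne_nil _ _)] at h2
          injection h2 with _ h2r
          have h2' : List.intercalate [':'] (List.take (p :: ps).length (q :: qs)) = t' := by
            simpa [List.take_succ_cons] using h2r
          have h1' : (p :: ps).length ≤ (q :: qs).length := by simpa using h1
          have := key.mp ⟨h1', h2'⟩
          rcases this with h | h
          · left; rw [h]
          · rcases h with ⟨u, hu⟩
            right; exact ⟨u, by simp [← hu]⟩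
        · intro h
          have h' : c' = t' ∨ t' ++ [':'] <+: c' := by
            rcases h with h | h
            · left; simpa using h
            · rcases h with ⟨u, hu⟩
              right; exact ⟨u, by simpa using hu⟩
          obtain ⟨h1, h2⟩ := key.mpr h'
          refine ⟨by simpa using h1, ?_⟩
          simp only [List.length_cons, List.take_succ_cons]
          rw [intercalate_nil_cons _ (List.cons_ne_nil _ _)]
          simpa [List.take_succ_cons] using h2
      · -- a = ':', d ≠ ':' : both sides false
        subst ha
        rw [split1_colon, hp, split1_cons_ne d c' q qs hd hq]
        constructor
        · rintro ⟨-, h2⟩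
          exfalso
          rw [List.length_cons, List.take_succ_cons, intercalate_cons_head] at h2
          injection h2 with hh _
          exact hd hh
        · rintro (h | h)
          · exfalso
            injection h with hh _
            exact hd hh
          · exfalso
            rcases h with ⟨u, hu⟩
            rw [List.cons_append] at hu
            injection hu with hh _
            exact hd hh.symm
      · -- a ≠ ':', d = ':' : both sides false
        subst hd
        rw [split1_cons_ne a t' p ps ha hp, split1_colon, hq]
        constructor
        · rintro ⟨-, h2⟩
          exfalso
          rw [List.length_cons, List.take_succ_cons] at h2
          cases htk : List.take ps.length (q :: qs) with
          | nil => rw [htk] at h2; simp [List.intercalate] at h2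
          | cons x xs =>
            rw [htk, intercalate_nil_cons _ (List.cons_ne_nil _ _)] at h2
            injection h2 with hh _
            exact ha hh.symm
        · rintro (h | h)
          · exfalso
            injection h with hh _
            exact ha hh.symm
          · exfalso
            rcases h with ⟨u, hu⟩
            rw [List.cons_append] at hu
            injection hu with hh _
            exact ha hh
      · -- neither head is ':'
        rw [split1_cons_ne a t' p ps ha hp, split1_cons_ne d c' q qs hd hq]
        constructor
        · rintro ⟨h1, h2⟩
          rw [List.length_cons, List.take_succ_cons, intercalate_cons_head] at h2
          injection h2 with hda h2r
          subst hda
          have h2' : List.intercalate [':'] (List.take (p :: ps).length (q :: qs)) = t' := by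
            simpa [List.take_succ_cons] using h2r
          have h1' : (p :: ps).length ≤ (q :: qs).length := by simpa using h1
          have := key.mp ⟨h1', h2'⟩
          rcases this with h | h
          · left; rw [h]
          · rcases h with ⟨u, hu⟩
            right; exact ⟨u, by simp [← hu]⟩
        · intro h
          have hda : d = a ∧ (c' = t' ∨ t' ++ [':'] <+: c') := by
            rcases h with h | h
            · injection h with hh ht
              exact ⟨hh, Or.inl ht⟩
            · rcases h with ⟨u, hu⟩
              rw [List.cons_append] at hu
              injection hu with hh ht
              exact ⟨hh.symm, Or.inr ⟨u, by simpa using ht⟩⟩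
          obtain ⟨rfl, h'⟩ := hda
          obtain ⟨h1, h2⟩ := key.mpr h'
          refine ⟨by simpa using h1, ?_⟩
          rw [List.length_cons, List.take_succ_cons, intercalate_cons_head]
          simpa [List.take_succ_cons] using h2

-- Lift to the ported functions: one truth allele of A's loop.
theorem elem_iff (c t : String) :
    ((pySplitColon t).length ≤ (pySplitColon c).length ∧
      PySem.Str.join ":" (pySplitColon t) =
        PySem.Str.join ":" (List.take (pySplitColon t).length (pySplitColon c)))
    ↔ (c = t ∨ PySem.Str.startswith c (t ++ ":") = true) := by
  have hmap : ∀ s : String, (pySplitColon s).map String.toList = split1 s.toList := by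
    intro s
    simp [pySplitColon, splitOn_colon, List.map_map, Function.comp_def]
  have hlen : ∀ s : String, (pySplitColon s).length = (split1 s.toList).length := by
    intro s; simp [pySplitColon, splitOn_colon]
  have hjoin : ∀ fs : List String, PySem.Str.join ":" fs =
      String.ofList (List.intercalate [':'] (fs.map String.toList)) := by
    intro fs
    simp [PySem.Str.join, PySem.Chars.join]
  constructor
  · rintro ⟨h1, h2⟩
    rw [hjoin, hjoin] at h2
    have h2' : List.intercalate [':'] ((pySplitColon t).map String.toList) =
        List.intercalate [':'] ((List.take (pySplitColon t).length (pySplitColon c)).map String.toList) := by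
      have := congrArg String.toList h2
      simpa [String.toList_ofList] using this
    rw [hmap, List.map_take, hmap, hlen] at h2'
    rw [join_split1] at h2'
    have := (main_iff c.toList t.toList).mp ⟨by rw [hlen, hlen] at h1; exact h1, h2'.symm⟩
    rcases this with h | h
    · left; exact String.toList_inj.mp h
    · right
      rw [PySem.Str.startswith_eq, PySem.Chars.startswith_iff]
      simpa using h
  · intro h
    have h' : c.toList = t.toList ∨ t.toList ++ [':'] <+: c.toList := by
      rcases h with h | h
      · left; rw [h]
      · right
        rw [PySem.Str.startswith_eq, PySem.Chars.startswith_iff] at h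
        simpa using h
    obtain ⟨h1, h2⟩ := (main_iff c.toList t.toList).mpr h'
    refine ⟨by rw [hlen, hlen]; exact h1, ?_⟩
    rw [hjoin, hjoin]
    congr 1
    rw [hmap, List.map_take, hmap, hlen, join_split1]
    exact h2.symm

-- A's loop equals the direct per-truth condition.
theorem go_eq_any (c : String) (ts : List String) :
    allele_matches_truth_go c ts =
      ts.any (fun t => c == t || PySem.Str.startswith c (t ++ ":")) := by
  induction ts with
  | nil => rfl
  | cons t rest ih =>
    rw [List.any_cons, ← ih]
    simp only [allele_matches_truth_go]
    have hslice : PySem.List.slice (pySplitColon c) none (some ((pySplitColon t).length : Int)) =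
        List.take (pySplitColon t).length (pySplitColon c) := by
      rw [PySem.List.slice_to _ (by positivity)]
      simp
    have hts : (t ++ ":").toList = t.toList ++ [':'] := by simp
    split_ifs with h1 h2 h3
    · simp [h1]
    · rw [hslice] at h3
      have := (elem_iff c t).mp ⟨h2, by simpa using h3⟩
      rcases this with h | h
      · simp [h] at h1
      · rw [PySem.Str.startswith_eq, hts] at h
        simp [h]
    · have hb : PySem.Str.startswith c (t ++ ":") = false := by
        by_contra hb
        rw [Bool.not_eq_false] at hb
        obtain ⟨-, hj⟩ := (elem_iff c t).mpr (Or.inr hb)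
        rw [hslice] at h3
        exact h3 (by simpa using hj)
      rw [PySem.Str.startswith_eq, hts] at hb
      simp [hb, h1]
    · have hb : PySem.Str.startswith c (t ++ ":") = false := by
        by_contra hb
        rw [Bool.not_eq_false] at hb
        obtain ⟨hl, -⟩ := (elem_iff c t).mpr (Or.inr hb)
        exact h2 hl
      rw [PySem.Str.startswith_eq, hts] at hb
      simp [hb, h1]

-- ---- B-side lemmas ----

-- membership in a conditional-add fold
theorem mem_foldl_add_if {α β : Type} [BEq α] [LawfulBEq α] (P : β → Prop) [DecidablePred P]
    (f : β → α) (l : List β) (y : α) :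
    ∀ (s : PySem.Set α),
    (y ∈ l.foldl (fun s b => if P b then PySem.Set.add s (f b) else s) s ↔
      y ∈ s ∨ ∃ b ∈ l, P b ∧ y = f b) := by
  induction l with
  | nil => intro s; simp
  | cons b r ih =>
    intro s
    rw [List.foldl_cons]
    by_cases hb : P b
    · rw [if_pos hb, ih, PySem.Set.mem_add]
      constructor
      · rintro ((h | h) | ⟨x, hx, hPx, rfl⟩)
        · left; exact h
        · right; exact ⟨b, by simp, hb, h⟩
        · right; exact ⟨x, by simp [hx], hPx, rfl⟩
      · rintro (h | ⟨x, hx, hPx, rfl⟩)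
        · left; left; exact h
        · rcases List.mem_cons.mp hx with rfl | hx'
          · left; right; rfl
          · right; exact ⟨x, hx', hPx, rfl⟩
    · rw [if_neg hb, ih]
      constructor
      · rintro (h | ⟨x, hx, hPx, rfl⟩)
        · left; exact h
        · right; exact ⟨x, by simp [hx], hPx, rfl⟩
      · rintro (h | ⟨x, hx, hPx, rfl⟩)
        · left; exact h
        · rcases List.mem_cons.mp hx with rfl | hx'
          · exact absurd hPx hb
          · right; exact ⟨x, hx', hPx, rfl⟩

-- the colon-cut characterisation of field-aligned proper prefixes
theorem cut_iff_startswith (c t : String) :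
    (∃ k : Nat, k < c.toList.length ∧ c.toList[k]? = some ':' ∧
      t = String.ofList (List.take k c.toList))
    ↔ PySem.Str.startswith c (t ++ ":") = true := by
  rw [PySem.Str.startswith_eq, PySem.Chars.startswith_iff]
  have hts : (t ++ ":").toList = t.toList ++ [':'] := by simp
  rw [hts]
  constructor
  · rintro ⟨k, hk, hget, rfl⟩
    have hv : c.toList[k] = ':' := (List.getElem?_eq_some_iff.mp hget).2
    refine ⟨List.drop (k + 1) c.toList, ?_⟩
    rw [String.toList_ofList]
    calc List.take k c.toList ++ [':'] ++ List.drop (k + 1) c.toList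
        = List.take k c.toList ++ (c.toList[k] :: List.drop (k + 1) c.toList) := by
          rw [hv]; simp
      _ = List.take k c.toList ++ List.drop k c.toList := by
          rw [← List.drop_eq_getElem_cons hk]
      _ = c.toList := List.take_append_drop _ _
  · rintro ⟨u, hu⟩
    have hcl : c.toList = t.toList ++ ':' :: u := by rw [← hu]; simp
    refine ⟨t.toList.length, ?_, ?_, ?_⟩
    · rw [hcl]; simp only [List.length_append, List.length_cons]; omega
    · rw [hcl, List.getElem?_append_right (le_refl _)]
      simp
    · rw [hcl, List.take_left]
      simp

-- B equals the same direct per-truth condition.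
theorem alt_eq_any (c : String) (ts : List String) :
    allele_matches_truth_alt c ts =
      ts.any (fun t => c == t || PySem.Str.startswith c (t ++ ":")) := by
  unfold allele_matches_truth_alt
  rw [Bool.eq_iff_iff]
  simp only [Bool.not_eq_true', List.any_eq_true, Bool.or_eq_true, beq_iff_eq]
  rw [← Bool.not_eq_true, PySem.Set.isdisjoint_iff]
  push Not
  constructor
  · rintro ⟨x, hx, hxt⟩
    have hx' := (mem_foldl_add_if (fun p : Int × Char => p.2 = ':')
        (fun p => String.ofList (PySem.List.slice c.toList none (some p.1)))
        (PySem.List.enumerate c.toList) x _).mp hx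
    rcases hx' with h | ⟨p, hmem, hcolon, rfl⟩
    · have : x = c := by simpa [PySem.Set.ofList] using h
      subst this
      exact ⟨x, hxt, Or.inl rfl⟩
    · obtain ⟨k, hk, hpk⟩ := (PySem.List.mem_enumerate_iff _ _ _).mp hmem
      subst hpk
      have hv : c.toList[k] = ':' := hcolon
      refine ⟨_, hxt, Or.inr ?_⟩
      apply (cut_iff_startswith c _).mp
      refine ⟨k, hk, ?_, ?_⟩
      · rw [List.getElem?_eq_getElem hk, hv]
      · rw [show ((0, c.toList[k]) : Int × Char).1 + (k : Int) = ((k : Nat) : Int) by simp]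
        rw [PySem.List.slice_to _ (by positivity)]
        simp
  · rintro ⟨t, ht, hcond⟩
    refine ⟨t, ?_, ht⟩
    apply (mem_foldl_add_if (fun p : Int × Char => p.2 = ':')
        (fun p => String.ofList (PySem.List.slice c.toList none (some p.1)))
        (PySem.List.enumerate c.toList) t _).mpr
    rcases hcond with rfl | hsw
    · left; simp [PySem.Set.ofList]
    · obtain ⟨k, hk, hget, rfl⟩ := (cut_iff_startswith c _).mpr hsw
      have hv : c.toList[k] = ':' := (List.getElem?_eq_some_iff.mp hget).2
      right
      refine ⟨((k : Int), ':'), ?_, rfl, ?_⟩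
      · exact (PySem.List.mem_enumerate_iff _ _ _).mpr ⟨k, hk, by simp [hv]⟩
      · rw [show (((k : Int), ':') : Int × Char).1 = ((k : Nat) : Int) from rfl]
        rw [PySem.List.slice_to _ (by positivity)]
        simp

-- ===== VERDICT (by name: the statement is the Claim_ definition above) =====
theorem allele_matches_truth_spec : Claim_equal_allele_matches_truth := by
  intro candidate truth_alleles _
  unfold Spec_allele_matches_truth allele_matches_truth
  rw [alt_eq_any]
  exact go_eq_any candidate truth_alleles
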